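-- pv_equiv track=rewrite | github.com/Shivani-Meena07/DataMind-AI | datamind/core/relationship_analyzer.py | _find_potential_targets
-- ===== SOURCE A (Python) =====
-- from typing import Dict, List, Optional, Set, Tuple, Any
--
-- def _find_potential_targets(
--
--     col_name: str,
--     pk_map: Dict[str, str],
--     current_table: str
-- ) -> List[Tuple[str, str]]:
--     """Find potential target tables for a column based on naming conventions."""
--     targets = []
--     col_lower = col_name.lower()
--
--     for table_name, pk_col in pk_map.items():
--         if table_name == current_table:
--             continue
--
--         table_lower = table_name.lower()
--
--         # Pattern: {table}_id
--         if col_lower == f"{table_lower}_id":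
--             targets.append((table_name, pk_col))
--         # Pattern: {table}id (no underscore)
--         elif col_lower == f"{table_lower}id":
--             targets.append((table_name, pk_col))
--         # Pattern: fk_{table}
--         elif col_lower == f"fk_{table_lower}":
--             targets.append((table_name, pk_col))
--         # Pattern: {singular}_id where table is {singular}s
--         elif table_lower.endswith('s') and col_lower == f"{table_lower[:-1]}_id":
--             targets.append((table_name, pk_col))
--         # Pattern: id_{table}
--         elif col_lower == f"id_{table_lower}":
--             targets.append((table_name, pk_col))
--
--     return targets
-- ===== SOURCE B (Python) =====
-- def _find_potential_targets(col_name, pk_map, current_table):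
--     """Find potential target tables for a column based on naming conventions."""
--     col = col_name.lower()
--     # Invert the five FK naming patterns once into candidate table names.
--     cands = []
--     if col.endswith('_id'):
--         cands += [col[:-3], col[:-3] + 's']
--     if col.endswith('id'):
--         cands.append(col[:-2])
--     if col.startswith('fk_'):
--         cands.append(col[3:])
--     if col.startswith('id_'):
--         cands.append(col[3:])
--     # Inverted index: lowered table name -> positions in pk_map (excluding current_table).
--     items = list(pk_map.items())
--     index = {}
--     for i, (t, _) in enumerate(items):
--         if t != current_table:
--             index[t.lower()] = index.get(t.lower(), []) + [i]
--     # Look up the candidates, then emit the hit positions in pk_map order.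
--     hits = set()
--     for c in cands:
--         hits.update(index.get(c, []))
--     return [items[i] for i in sorted(hits)]
-- ===== Notes on version B (the rewrite author's own statement) =====
-- stated objective: alternative
-- what changed: B replaces A's per-table five-pattern if/elif scan by an inverted index: it derives the candidate table names from the column once, builds a position index of pk_map keyed by lowered table name, looks up the candidates, and emits the hit positions in sorted (= pk_map) order.
import Mathlib
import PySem

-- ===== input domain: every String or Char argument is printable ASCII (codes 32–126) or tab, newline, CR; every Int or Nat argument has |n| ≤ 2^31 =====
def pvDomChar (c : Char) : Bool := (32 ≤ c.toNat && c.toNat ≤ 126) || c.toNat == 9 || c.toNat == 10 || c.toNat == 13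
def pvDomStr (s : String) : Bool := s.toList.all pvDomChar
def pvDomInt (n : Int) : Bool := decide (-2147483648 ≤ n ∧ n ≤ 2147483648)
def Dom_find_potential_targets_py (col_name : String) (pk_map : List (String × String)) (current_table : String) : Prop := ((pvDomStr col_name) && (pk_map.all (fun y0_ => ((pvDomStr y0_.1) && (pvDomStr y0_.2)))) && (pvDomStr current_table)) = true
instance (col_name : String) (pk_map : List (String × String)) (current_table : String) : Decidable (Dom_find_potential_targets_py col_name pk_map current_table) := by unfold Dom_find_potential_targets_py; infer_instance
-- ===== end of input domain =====

-- B replaces A's per-table five-pattern if/elif scan by an inverted index: candidate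
-- table names are derived from the column once, pk_map positions are indexed by lowered
-- table name, the candidates are looked up and the hit positions emitted in sorted order
-- (objective: alternative).

-- ===== PORT A =====
def find_potential_targets_py (col_name : String) (pk_map : List (String × String)) (current_table : String) : List (String × String) :=
  let col_lower := PySem.Str.lower col_name
  pk_map.foldl (fun targets p =>
    if p.1 == current_table then targets
    else
      let table_lower := PySem.Str.lower p.1
      if col_lower == table_lower ++ "_id" then targets ++ [(p.1, p.2)]
      else if col_lower == table_lower ++ "id" then targets ++ [(p.1, p.2)]
      else if col_lower == "fk_" ++ table_lower then targets ++ [(p.1, p.2)]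
      else if PySem.Str.endswith table_lower "s" && (col_lower == PySem.Str.slice table_lower none (some (-1)) ++ "_id") then targets ++ [(p.1, p.2)]
      else if col_lower == "id_" ++ table_lower then targets ++ [(p.1, p.2)]
      else targets) []

-- ===== PORT B =====
-- candidate table names derived from the lowered column (Source B's `cands` block)
def fptCandList (col : String) : List String :=
  let cands : List String := []
  let cands := if PySem.Str.endswith col "_id" then
      cands ++ [PySem.Str.slice col none (some (-3)), PySem.Str.slice col none (some (-3)) ++ "s"]
    else cands
  let cands := if PySem.Str.endswith col "id" then
      cands ++ [PySem.Str.slice col none (some (-2))] else cands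
  let cands := if PySem.Str.startswith col "fk_" then
      cands ++ [PySem.Str.slice col (some 3) none] else cands
  if PySem.Str.startswith col "id_" then
    cands ++ [PySem.Str.slice col (some 3) none] else cands

-- inverted index: lowered table name -> positions in pk_map (Source B's `index` loop)
def fptIndex (items : List (String × String)) (current_table : String) : PySem.Dict String (List Int) :=
  (PySem.List.enumerate items).foldl (fun d p =>
    if p.2.1 != current_table then
      d.insert (PySem.Str.lower p.2.1) (d.getD (PySem.Str.lower p.2.1) [] ++ [p.1])
    else d) PySem.Dict.empty

def find_potential_targets_py_alt (col_name : String) (pk_map : List (String × String)) (current_table : String) : List (String × String) :=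
  let col := PySem.Str.lower col_name
  let cands := fptCandList col
  let items := pk_map
  let index := fptIndex items current_table
  let hits : PySem.Set Int :=
    cands.foldl (fun s c => PySem.Set.update s (index.getD c [])) PySem.Set.empty
  -- every hit is an index produced by enumerate, so items[i] cannot raise;
  -- pyGet? … |>.getD is the exact total form of Python's items[i] here
  (PySem.List.sorted hits (fun x => x) false).map
    (fun i => (PySem.List.pyGet? items i).getD ("", ""))

-- ===== PRECONDITION & SPEC =====
def Spec_find_potential_targets_py (col_name : String) (pk_map : List (String × String)) (current_table : String) (out : List (String × String)) : Prop := out = find_potential_targets_py_alt col_name pk_map current_table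
instance (col_name : String) (pk_map : List (String × String)) (current_table : String) (out : List (String × String)) : Decidable (Spec_find_potential_targets_py col_name pk_map current_table out) := by unfold Spec_find_potential_targets_py; infer_instance

-- ===== CLAIM (what is proved, stated in full; the proofs are below) =====
def Claim_equal_find_potential_targets_py : Prop := ∀ (col_name : String) (pk_map : List (String × String)) (current_table : String), Dom_find_potential_targets_py col_name pk_map current_table → Spec_find_potential_targets_py col_name pk_map current_table (find_potential_targets_py col_name pk_map current_table)

-- ===== LEMMAS AND PROOFS =====

-- l = t ++ u  iff  u is a suffix of l and t is what remains
theorem eq_append_suffix {α : Type} (l t u : List α) :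
    l = t ++ u ↔ (u <:+ l ∧ t = l.take (l.length - u.length)) := by
  constructor
  · rintro rfl
    refine ⟨⟨t, rfl⟩, ?_⟩
    simp
  · rintro ⟨⟨t', rfl⟩, ht⟩
    simp at ht
    rw [ht]

-- l = u ++ t  iff  u is a prefix of l and t is what remains
theorem eq_append_prefix {α : Type} (l t u : List α) :
    l = u ++ t ↔ (u <+: l ∧ t = l.drop u.length) := by
  constructor
  · rintro rfl
    exact ⟨⟨t, rfl⟩, by simp⟩
  · rintro ⟨⟨t', rfl⟩, ht⟩
    simp at ht
    rw [ht]

theorem string_eq_iff_toList (s t : String) : s = t ↔ s.toList = t.toList := by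
  constructor
  · rintro rfl; rfl
  · intro h; exact String.ext (by simpa [String.toList] using h)

theorem toList_slice_neg3 (c : String) :
    (PySem.Str.slice c none (some (-3))).toList = c.toList.take (c.toList.length - 3) := by
  simp only [PySem.Str.toList_slice, PySem.Chars.slice_eq_listSlice]
  rw [PySem.List.slice_to_neg_ofNat _ 3 (by omega)]

theorem toList_slice_neg2 (c : String) :
    (PySem.Str.slice c none (some (-2))).toList = c.toList.take (c.toList.length - 2) := by
  simp only [PySem.Str.toList_slice, PySem.Chars.slice_eq_listSlice]
  rw [PySem.List.slice_to_neg_ofNat _ 2 (by omega)]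

theorem toList_slice_neg1 (c : String) :
    (PySem.Str.slice c none (some (-1))).toList = c.toList.dropLast := by
  simp only [PySem.Str.toList_slice, PySem.Chars.slice_eq_listSlice, PySem.List.slice_to_neg_one]

theorem toList_slice_from3 (c : String) :
    (PySem.Str.slice c (some 3) none).toList = c.toList.drop 3 := by
  simp only [PySem.Str.toList_slice, PySem.Chars.slice_eq_listSlice]
  rw [show ((3:Int)) = ((3:Nat):Int) by norm_num, PySem.List.slice_from_natCast]

-- Pattern 1: c = t ++ "_id"
theorem pat1 (c t : String) :
    c = t ++ "_id" ↔
      (PySem.Str.endswith c "_id" = true ∧ t = PySem.Str.slice c none (some (-3))) := by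
  rw [string_eq_iff_toList, string_eq_iff_toList t, toList_slice_neg3]
  simp only [String.toList_append, PySem.Str.endswith_eq, PySem.Chars.endswith_iff]
  simpa using eq_append_suffix c.toList t.toList "_id".toList

-- Pattern 2: c = t ++ "id"
theorem pat2 (c t : String) :
    c = t ++ "id" ↔
      (PySem.Str.endswith c "id" = true ∧ t = PySem.Str.slice c none (some (-2))) := by
  rw [string_eq_iff_toList, string_eq_iff_toList t, toList_slice_neg2]
  simp only [String.toList_append, PySem.Str.endswith_eq, PySem.Chars.endswith_iff]
  simpa using eq_append_suffix c.toList t.toList "id".toList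

-- Pattern 3: c = "fk_" ++ t
theorem pat3 (c t : String) :
    c = "fk_" ++ t ↔
      (PySem.Str.startswith c "fk_" = true ∧ t = PySem.Str.slice c (some 3) none) := by
  rw [string_eq_iff_toList, string_eq_iff_toList t, toList_slice_from3]
  simp only [String.toList_append, PySem.Str.startswith_eq, PySem.Chars.startswith_iff]
  simpa using eq_append_prefix c.toList t.toList "fk_".toList

-- Pattern 5: c = "id_" ++ t
theorem pat5 (c t : String) :
    c = "id_" ++ t ↔
      (PySem.Str.startswith c "id_" = true ∧ t = PySem.Str.slice c (some 3) none) := by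
  rw [string_eq_iff_toList, string_eq_iff_toList t, toList_slice_from3]
  simp only [String.toList_append, PySem.Str.startswith_eq, PySem.Chars.startswith_iff]
  simpa using eq_append_prefix c.toList t.toList "id_".toList

-- Pattern 4 (singular): table ends in 's' and c = table[:-1] ++ "_id"
theorem pat4 (c t : String) :
    (PySem.Str.endswith t "s" = true ∧ c = PySem.Str.slice t none (some (-1)) ++ "_id") ↔
      (PySem.Str.endswith c "_id" = true ∧ t = PySem.Str.slice c none (some (-3)) ++ "s") := by
  rw [string_eq_iff_toList c, string_eq_iff_toList t]
  simp only [String.toList_append, toList_slice_neg1, toList_slice_neg3,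
    PySem.Str.endswith_eq, PySem.Chars.endswith_iff]
  rw [eq_append_suffix c.toList, eq_append_suffix t.toList]
  have h3 : ("_id".toList).length = 3 := by decide
  have h1 : ("s".toList).length = 1 := by decide
  rw [h3, h1]
  have hd : t.toList.dropLast = t.toList.take (t.toList.length - 1) := by
    rw [List.dropLast_eq_take]
  constructor
  · rintro ⟨hs, hi, he⟩
    exact ⟨hi, hs, by rw [← he, ← hd]⟩
  · rintro ⟨hi, hs, he⟩
    exact ⟨hs, hi, by rw [hd, ← he]⟩

set_option maxHeartbeats 8000000 in
theorem mem_fptCandList (c t : String) :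
    t ∈ fptCandList c ↔
      (c = t ++ "_id" ∨ c = t ++ "id" ∨ c = "fk_" ++ t ∨
       (PySem.Str.endswith t "s" = true ∧ c = PySem.Str.slice t none (some (-1)) ++ "_id") ∨
       c = "id_" ++ t) := by
  rw [pat1 c t, pat2 c t, pat3 c t, pat4 c t, pat5 c t]
  by_cases h1 : PySem.Chars.endswith c.toList ['_', 'i', 'd'] = true <;>
  by_cases h2 : PySem.Chars.endswith c.toList ['i', 'd'] = true <;>
  by_cases h3 : PySem.Chars.startswith c.toList ['f', 'k', '_'] = true <;>
  by_cases h4 : PySem.Chars.startswith c.toList ['i', 'd', '_'] = true <;>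
  simp [fptCandList, h1, h2, h3, h4] <;> tauto

-- the Bool predicate both sides reduce to
def fptPred (c ct : String) (p : String × String) : Bool :=
  p.1 != ct && (fptCandList c).contains (PySem.Str.lower p.1)

-- ---- A side: A's foldl is a filter by fptPred ----

theorem foldl_congr_fun {α β : Type} (l : List α) (f g : β → α → β) (init : β)
    (h : ∀ acc x, f acc x = g acc x) : l.foldl f init = l.foldl g init := by
  induction l generalizing init with
  | nil => rfl
  | cons x xs ih => simp only [List.foldl_cons, h, ih]

theorem foldl_append_filter {α : Type} (p : α → Bool) (l : List α) (acc : List α) :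
    l.foldl (fun a x => if p x then a ++ [x] else a) acc = acc ++ l.filter p := by
  induction l generalizing acc with
  | nil => simp
  | cons x xs ih => by_cases h : p x <;> simp [h, ih]

theorem step_eq (c ct : String) (acc : List (String × String)) (p : String × String) :
    (if p.1 == ct then acc
     else
      let table_lower := PySem.Str.lower p.1
      if c == table_lower ++ "_id" then acc ++ [(p.1, p.2)]
      else if c == table_lower ++ "id" then acc ++ [(p.1, p.2)]
      else if c == "fk_" ++ table_lower then acc ++ [(p.1, p.2)]
      else if PySem.Str.endswith table_lower "s" && (c == PySem.Str.slice table_lower none (some (-1)) ++ "_id") then acc ++ [(p.1, p.2)]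
      else if c == "id_" ++ table_lower then acc ++ [(p.1, p.2)]
      else acc)
    = (if fptPred c ct p then acc ++ [p] else acc) := by
  have hmem := mem_fptCandList c (PySem.Str.lower p.1)
  simp only [fptPred]
  by_cases hct : p.1 = ct
  · simp [hct]
  · simp only [hct, beq_iff_eq]
    split_ifs <;> simp_all

theorem a_eq_filter (c ct : String) (l : List (String × String)) :
    l.foldl (fun targets p =>
      if p.1 == ct then targets
      else
        let table_lower := PySem.Str.lower p.1
        if c == table_lower ++ "_id" then targets ++ [(p.1, p.2)]
        else if c == table_lower ++ "id" then targets ++ [(p.1, p.2)]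
        else if c == "fk_" ++ table_lower then targets ++ [(p.1, p.2)]
        else if PySem.Str.endswith table_lower "s" && (c == PySem.Str.slice table_lower none (some (-1)) ++ "_id") then targets ++ [(p.1, p.2)]
        else if c == "id_" ++ table_lower then targets ++ [(p.1, p.2)]
        else targets) []
    = l.filter (fptPred c ct) := by
  refine Eq.trans (foldl_congr_fun l _
    (fun acc p => if fptPred c ct p then acc ++ [p] else acc) []
    (fun acc p => step_eq c ct acc p)) ?_
  rw [foldl_append_filter]
  simp

-- ---- B side: the index/lookup/sort pipeline is the same filter ----


theorem fptIndex_getD' (items : List (String × String)) (ct c : String) :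
    (fptIndex items ct).getD c [] =
      ((PySem.List.enumerate items).filter
        (fun p => p.2.1 != ct && (PySem.Str.lower p.2.1 == c))).map (·.1) := by
  unfold fptIndex
  suffices h : ∀ (l : List (Int × String × String)) (d : PySem.Dict String (List Int)),
      (l.foldl (fun d p =>
        if p.2.1 != ct then
          d.insert (PySem.Str.lower p.2.1) (d.getD (PySem.Str.lower p.2.1) [] ++ [p.1])
        else d) d).getD c []
      = d.getD c [] ++ (l.filter (fun p => p.2.1 != ct && (PySem.Str.lower p.2.1 == c))).map (·.1) by
    simpa using h (PySem.List.enumerate items) PySem.Dict.empty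
  intro l
  induction l with
  | nil => simp
  | cons p rest ih =>
    intro d
    rw [List.foldl_cons]
    by_cases hne : p.2.1 = ct
    · rw [if_neg (by simp [hne]), ih, List.filter_cons_of_neg (by simp [hne])]
    · rw [if_pos (by simp [hne]), ih]
      by_cases hc : PySem.Str.lower p.2.1 = c
      · rw [hc, PySem.Dict.getD_insert_self, List.filter_cons_of_pos (by simp [hne, hc])]
        simp
      · rw [PySem.Dict.getD_insert_of_ne d _ [] (fun a => hc a.symm),
          List.filter_cons_of_neg (by simp [hc])]

theorem mem_foldl_update {α : Type} [BEq α] [LawfulBEq α] (cs : List String) (f : String → List α)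
    (s : PySem.Set α) (x : α) :
    x ∈ cs.foldl (fun s c => PySem.Set.update s (f c)) s ↔ x ∈ s ∨ ∃ c ∈ cs, x ∈ f c := by
  induction cs generalizing s with
  | nil => simp
  | cons c rest ih =>
    rw [List.foldl_cons, ih, PySem.Set.mem_update]
    constructor
    · rintro ((h|h)|⟨c',hc',hx⟩)
      · exact Or.inl h
      · exact Or.inr ⟨c, by simp, h⟩
      · exact Or.inr ⟨c', by simp [hc'], hx⟩
    · rintro (h|⟨c',hc',hx⟩)
      · exact Or.inl (Or.inl h)
      · rcases List.mem_cons.mp hc' with rfl|h'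
        · exact Or.inl (Or.inr hx)
        · exact Or.inr ⟨c', h', hx⟩

theorem nodup_foldl_update {α : Type} [BEq α] [LawfulBEq α] (cs : List String) (f : String → List α)
    (s : PySem.Set α) (hs : s.Nodup) :
    (cs.foldl (fun s c => PySem.Set.update s (f c)) s).Nodup := by
  induction cs generalizing s with
  | nil => exact hs
  | cons c rest ih => exact ih _ (PySem.Set.nodup_update _ _ hs)

theorem b_eq_filter (c ct : String) (l : List (String × String)) :
    (PySem.List.sorted
      ((fptCandList c).foldl
        (fun s cc => PySem.Set.update s ((fptIndex l ct).getD cc []))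
        PySem.Set.empty) (fun x => x) false).map
      (fun i => (PySem.List.pyGet? l i).getD ("", ""))
    = l.filter (fptPred c ct) := by
  set hits := ((fptCandList c).foldl
        (fun s cc => PySem.Set.update s ((fptIndex l ct).getD cc []))
        PySem.Set.empty) with hhits
  set q : Int × String × String → Bool := fun p => p.2.1 != ct && (fptCandList c).contains (PySem.Str.lower p.2.1) with hq
  set R := ((PySem.List.enumerate l).filter q).map (·.1) with hR
  have hmem : ∀ x : Int, x ∈ hits ↔ x ∈ R := by
    intro x
    rw [hhits, mem_foldl_update]
    simp only [PySem.Set.empty, List.not_mem_nil, false_or]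
    simp only [fptIndex_getD', hR, hq,
      List.mem_map, List.mem_filter, Bool.and_eq_true, beq_iff_eq, bne_iff_ne, ne_eq,
      List.contains_iff_mem]
    constructor
    · rintro ⟨cc, hcc, p, ⟨hp, hne, rfl⟩, rfl⟩
      exact ⟨p, ⟨hp, hne, hcc⟩, rfl⟩
    · rintro ⟨p, ⟨hp, hne, hcc⟩, rfl⟩
      exact ⟨_, hcc, p, ⟨hp, hne, rfl⟩, rfl⟩
  have hpwR : R.Pairwise (· < ·) := by
    rw [hR, List.pairwise_map]
    exact (PySem.List.pairwise_lt_enumerate l 0).filter q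
  have hnodupR : R.Nodup := hpwR.imp (fun h => ne_of_lt h)
  have hnodupH : hits.Nodup := nodup_foldl_update _ _ _ List.nodup_nil
  have hperm : R.Perm hits :=
    (List.perm_ext_iff_of_nodup hnodupR hnodupH).mpr (fun x => ((hmem x).symm))
  have hs : PySem.List.sorted hits (fun x : Int => x) false = R :=
    PySem.List.sorted_eq_of_perm_of_pairwise_lt _ _ _ hperm (by simpa using hpwR)
  rw [hs]
  rw [hR, List.map_map]
  rw [List.map_congr_left (g := (·.2)) ?h]
  · rw [hq]
    have hqe : (fun p : Int × String × String => p.2.1 != ct && (fptCandList c).contains (PySem.Str.lower p.2.1))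
        = ((fptPred c ct) ∘ (fun p : Int × String × String => p.2)) := rfl
    rw [hqe, ← List.filter_map, PySem.List.map_snd_enumerate]
  · intro a ha
    have ha' := List.mem_of_mem_filter ha
    rw [PySem.List.mem_enumerate_iff] at ha'
    obtain ⟨k, hk, rfl⟩ := ha'
    simp [PySem.List.pyGet?_natCast, List.getElem?_eq_getElem hk]

-- ===== VERDICT (by name: the statement is the Claim_ definition above) =====
theorem find_potential_targets_py_spec : Claim_equal_find_potential_targets_py := by
  intro col_name pk_map current_table _
  exact (a_eq_filter (PySem.Str.lower col_name) current_table pk_map).trans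
    (b_eq_filter (PySem.Str.lower col_name) current_table pk_map).symm
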